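-- pv_equiv track=rewrite | github.com/Unagi-zoso/five-golds-in-a-day | out/production/five-golds-in-a-day/kakao_blind_23_4.py | solution
-- ===== SOURCE A (Python) =====
-- def solution(numbers):
--     def rec(idx, s):
--         if answer[idx] == 0 or (rt_idx := len(s)//2) == 0:
--             return
--
--         if s[rt_idx] == '0' and ('1' in s):
--             answer[idx] = 0
--         else:
--             rec(idx, s[:rt_idx]), rec(idx, s[rt_idx+1:])
--
--     answer = [1 for _ in range(len(numbers))]
--     for idx, n in enumerate(numbers):
--         t_b = bin(n)[2:]
--         l_b, i = len(t_b), 1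
--         while l_b >= i:
--             i *= 2
--         t_b = t_b.rjust(i-1, '0')
--         rec(idx, t_b)
--     return answer
-- ===== SOURCE B (Python) =====
-- def solution(numbers):
--     def check(s, lo, hi):
--         # returns (subtree contains '1', subtree coloring is valid) for nodes s[lo:hi)
--         if lo >= hi:
--             return (False, True)
--         mid = (lo + hi) // 2
--         h1, v1 = check(s, lo, mid)
--         h2, v2 = check(s, mid + 1, hi)
--         c = s[mid]
--         return (h1 or h2 or c == '1',
--                 v1 and v2 and not (c == '0' and (h1 or h2)))
--     out = []
--     for n in numbers:
--         b = bin(n)[2:]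
--         size = 1 << len(b).bit_length()   # smallest power of two > len(b)
--         s = b.rjust(size - 1, '0')
--         out.append(1 if check(s, 0, len(s))[1] else 0)
--     return out
-- ===== Notes on version B (the rewrite author's own statement) =====
-- stated objective: alternative
-- what changed: A validates each padded binary string top-down, rescanning every subtree with `'1' in s` and copying two slices per node (pruning once an index is known invalid); B instead makes a single bottom-up divide-and-conquer pass over index ranges that returns (contains-a-1, valid) per subtree, with no substring scans, slice copies or cross-call state.
import Mathlib
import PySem

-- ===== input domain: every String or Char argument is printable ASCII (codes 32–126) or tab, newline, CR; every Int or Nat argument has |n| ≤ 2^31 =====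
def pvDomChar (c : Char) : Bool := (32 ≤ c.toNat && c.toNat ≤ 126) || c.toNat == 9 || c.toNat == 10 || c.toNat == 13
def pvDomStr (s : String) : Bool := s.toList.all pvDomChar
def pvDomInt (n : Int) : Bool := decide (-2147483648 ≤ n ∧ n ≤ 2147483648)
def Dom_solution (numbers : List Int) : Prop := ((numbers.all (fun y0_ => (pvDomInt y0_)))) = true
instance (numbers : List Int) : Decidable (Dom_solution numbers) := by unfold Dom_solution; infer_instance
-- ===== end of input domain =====

-- B replaces A's top-down recursion (whose every node rescans its subtree with `'1' in s` and copies
-- two slices) by a single bottom-up pass over index ranges returning (has-a-'1', valid) per subtree.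

-- ===== PORT A =====

-- bin(n)[2:] : Python bin gives '0b<digits>' for n ≥ 0 and '-0b<digits>' for n < 0, so [2:] is
-- the digit string for n ≥ 0 and 'b' ++ digits of |n| for n < 0. Ported by hand (PySem has no
-- bin); Nat.toDigits 2 is exactly Python's binary digit string (Nat.toDigits 2 0 = ['0']).
-- Used by both ports: both Python versions compute exactly bin(n)[2:].
def pyBinTail (n : Int) : List Char :=
  if n < 0 then 'b' :: Nat.toDigits 2 n.natAbs else Nat.toDigits 2 n.toNat

-- A's `i = 1; while l_b >= i: i *= 2` loop (the i = 0 guard only makes it total; A calls it with i = 1)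
def padLoopA (l i : Nat) : Nat :=
  if i = 0 then 0
  else if i ≤ l then padLoopA l (2 * i) else i
termination_by l + 1 - i
decreasing_by omega

-- rec(idx, s): answer[idx] is threaded as `a` (rec only ever reads/writes that one cell);
-- s[rt] via getD is exact: rt = len//2 < len whenever len//2 ≠ 0, so Python never raises here.
def recA (a : Int) (s : List Char) : Int :=
  if a = 0 ∨ s.length / 2 = 0 then a
  else
    let rt := s.length / 2
    if s.getD rt '?' = '0' ∧ '1' ∈ s then 0
    else recA (recA a (s.take rt)) (s.drop (rt + 1))
termination_by s.length
decreasing_by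
  · simp only [List.length_take]; omega
  · simp only [List.length_drop]; omega

def solution (numbers : List Int) : List Int :=
  let answer := numbers.map (fun _ => (1 : Int))
  (PySem.List.enumerate numbers 0).foldl
    (fun ans p =>
      let t_b := pyBinTail p.2
      let i := padLoopA t_b.length 1
      let t := List.replicate ((i - 1) - t_b.length) '0' ++ t_b   -- t_b.rjust(i-1, '0')
      ans.set p.1.toNat (recA (ans.getD p.1.toNat 0) t))
    answer

-- ===== PORT B =====

-- bottom-up: (subtree at nodes s[lo:hi) contains '1', subtree coloring is valid)
def checkB (s : List Char) (lo hi : Nat) : Bool × Bool :=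
  if lo ≥ hi then (false, true)
  else
    let mid := (lo + hi) / 2
    let p1 := checkB s lo mid
    let p2 := checkB s (mid + 1) hi
    let c := s.getD mid '?'   -- exact: lo ≤ mid < hi ≤ s.length at every call reached from solution_alt
    (p1.1 || p2.1 || (c == '1'), p1.2 && p2.2 && !(c == '0' && (p1.1 || p2.1)))
termination_by hi - lo
decreasing_by all_goals omega

def solution_alt (numbers : List Int) : List Int :=
  numbers.map (fun n =>
    let b := pyBinTail n
    let size := 1 <<< PySem.Int.bitLength (b.length : Int)   -- 1 << len(b).bit_length()
    let s := List.replicate ((size - 1) - b.length) '0' ++ b -- b.rjust(size - 1, '0')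
    if (checkB s 0 s.length).2 then (1 : Int) else 0)

-- ===== PRECONDITION & SPEC =====
def Spec_solution (numbers : List Int) (out : List Int) : Prop := out = solution_alt numbers
instance (numbers : List Int) (out : List Int) : Decidable (Spec_solution numbers out) := by unfold Spec_solution; infer_instance

-- ===== CLAIM (what is proved, stated in full; the proofs are below) =====
def Claim_equal_solution : Prop := ∀ (numbers : List Int), Dom_solution numbers → Spec_solution numbers (solution numbers)

-- ===== LEMMAS AND PROOFS =====

-- proof-side validity predicate: recA's branch structure, stripped of the threaded value
def Vs (s : List Char) : Bool :=
  if s.length / 2 = 0 then true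
  else
    let rt := s.length / 2
    if s.getD rt '?' = '0' ∧ '1' ∈ s then false
    else Vs (s.take rt) && Vs (s.drop (rt + 1))
termination_by s.length
decreasing_by
  · simp only [List.length_take]; omega
  · simp only [List.length_drop]; omega

lemma recA_eq_Vs (a : Int) (s : List Char) :
    recA a s = if a = 0 then 0 else if Vs s then a else 0 := by
  induction s using Vs.induct generalizing a with
  | case1 s h =>
    rw [recA, Vs]
    by_cases ha : a = 0 <;> simp [h, ha]
  | case2 s h rt hcond =>
    rw [recA, Vs]
    by_cases ha : a = 0
    · simp [ha]
    · rw [if_neg (by simp [ha, h]), if_pos hcond, if_neg ha, if_neg h, if_pos hcond]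
      simp
  | case3 s h rt hcond ih1 ih2 =>
    rw [recA, Vs]
    by_cases ha : a = 0
    · simp [ha]
    · rw [if_neg (by simp [ha, h]), if_neg hcond, if_neg ha, if_neg h, if_neg hcond]
      rw [ih1, ih2]
      by_cases h1 : Vs (s.take rt) <;> by_cases h2 : Vs (s.drop (rt+1)) <;> simp [h1, h2, ha] <;>
        first
          | exact ⟨h1, h2⟩
          | (intro ha1 ha2; exact absurd ha2 h2)
          | (intro ha1 ha2; exact absurd ha1 h1)

lemma seg_decomp (t : List Char) (r : Nat) (hr : r < t.length) :
    t = t.take r ++ t.getD r '?' :: t.drop (r + 1) := by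
  conv_lhs => rw [← List.take_append_drop r t]
  rw [← List.getElem_cons_drop hr, List.getD_eq_getElem _ _ hr]

lemma checkB_eq (s : List Char) : ∀ (d lo hi : Nat), hi - lo = d → hi ≤ s.length →
    checkB s lo hi = (decide ('1' ∈ (s.drop lo).take (hi - lo)), Vs ((s.drop lo).take (hi - lo))) := by
  intro d
  induction d using Nat.strong_induction_on with
  | _ d ih =>
    intro lo hi hd hhi
    rw [checkB]
    by_cases hge : lo ≥ hi
    · have h0 : hi - lo = 0 := by omega
      rw [if_pos hge, h0]
      simp [Vs]
    · rw [if_neg hge]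
      have hlt : lo < hi := by omega
      have hmid1 : lo ≤ (lo + hi) / 2 := by omega
      have hmid2 : (lo + hi) / 2 < hi := by omega
      have hmlo : (lo + hi) / 2 - lo = (hi - lo) / 2 := by omega
      set mid := (lo + hi) / 2 with hm
      set r := (hi - lo) / 2 with hrdef
      set seg := (s.drop lo).take (hi - lo) with hseg
      have hlen : seg.length = hi - lo := by
        simp [hseg]; omega
      have hrlen : r < seg.length := by rw [hlen]; omega
      have hL : (s.drop lo).take (mid - lo) = seg.take r := by
        rw [hseg, List.take_take]
        congr 1
        omega
      have hR : (s.drop (mid + 1)).take (hi - (mid + 1)) = seg.drop (r + 1) := by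
        rw [hseg, List.drop_take, List.drop_drop]
        congr 1
        · omega
        · congr 1
          omega
      have hrhl : r < hi - lo := by omega
      have hc : s.getD mid '?' = seg.getD r '?' := by
        rw [List.getD_eq_getElem?_getD, List.getD_eq_getElem?_getD, hseg,
          List.getElem?_take, if_pos hrhl, List.getElem?_drop,
          show lo + r = mid by omega]
      have i1 := ih (mid - lo) (by omega) lo mid rfl (by omega)
      have i2 := ih (hi - (mid + 1)) (by omega) (mid + 1) hi rfl hhi
      simp only []
      rw [i1, i2, hL, hR, hc]
      have hdec := seg_decomp seg r hrlen
      have hmem : ('1' ∈ seg) ↔ ('1' ∈ seg.take r ∨ '1' = seg[r]?.getD '?' ∨ '1' ∈ seg.drop (r + 1)) := by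
        conv_lhs => rw [hdec]
        simp [List.getD_eq_getElem?_getD]
      simp only [Prod.mk.injEq]
      refine ⟨?_, ?_⟩
      · -- first component
        simp only [hmem]
        have hb1 : (seg[r]?.getD '?' == '1') = decide ('1' = seg[r]?.getD '?') := by
          by_cases e : seg[r]?.getD '?' = '1'
          · simp [e]
          · have e' : ¬('1' = seg[r]?.getD '?') := fun h => e h.symm
            simp [e, e']
        by_cases e1 : '1' ∈ seg.take r <;> by_cases e2 : '1' ∈ seg.drop (r + 1) <;>
          by_cases e3 : '1' = seg[r]?.getD '?' <;>
          simp [e1, e2, e3, hb1, List.getD_eq_getElem?_getD]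
      · -- second component
        by_cases hr0 : r = 0
        · have h1 : hi - lo = 1 := by omega
          have : seg.length = 1 := by omega
          have hVs : Vs seg = true := by rw [Vs]; simp [this]
          have e1 : seg.take r = [] := by simp [hr0]
          have e2 : seg.drop (r + 1) = [] := by
            apply List.eq_nil_of_length_eq_zero
            simp [this, hr0]
          rw [hVs, e1, e2]
          simp [Vs]
        · have hVs : Vs seg = (if seg.getD (seg.length / 2) '?' = '0' ∧ '1' ∈ seg then false
              else Vs (seg.take (seg.length / 2)) && Vs (seg.drop (seg.length / 2 + 1))) := by
            rw [Vs, if_neg (by omega)]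
          simp only [List.getD_eq_getElem?_getD] at hVs
          have hrr : seg.length / 2 = r := by omega
          rw [hVs, hrr]
          by_cases e0 : seg[r]?.getD '?' = '0'
          · by_cases e4 : '1' ∈ seg
            · rw [if_pos ⟨e0, e4⟩]
              have : ('1' ∈ seg.take r ∨ '1' ∈ seg.drop (r + 1)) := by
                rcases hmem.mp e4 with h | h | h
                · exact Or.inl h
                · exfalso; rw [← h] at e0; exact absurd e0 (by decide)
                · exact Or.inr h
              rcases this with h | h <;> simp [e0, h, List.getD_eq_getElem?_getD]
            · rw [if_neg (by tauto)]
              have n1 : ¬ '1' ∈ seg.take r := fun h => e4 (hmem.mpr (Or.inl h))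
              have n2 : ¬ '1' ∈ seg.drop (r + 1) := fun h => e4 (hmem.mpr (Or.inr (Or.inr h)))
              simp [n1, n2, List.getD_eq_getElem?_getD]
          · rw [if_neg (by tauto)]
            simp [e0, List.getD_eq_getElem?_getD]

lemma padLoopA_aux (l : Nat) : ∀ k, k ≤ PySem.Int.bitLength (l : Int) →
    padLoopA l (2 ^ (PySem.Int.bitLength (l : Int) - k)) = 2 ^ PySem.Int.bitLength (l : Int) := by
  intro k
  induction k with
  | zero =>
    intro _
    rw [Nat.sub_zero, padLoopA]
    have h1 : l < 2 ^ PySem.Int.bitLength (l : Int) := by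
      have := PySem.Int.lt_two_pow_bitLength (l : Int)
      simpa using this
    rw [if_neg (by positivity), if_neg (by omega)]
  | succ k ih =>
    intro hk
    have hl0 : l ≠ 0 := by
      intro h
      subst h
      simp [PySem.Int.bitLength_zero] at hk
    have h2 : 2 ^ (PySem.Int.bitLength (l : Int) - (k + 1)) ≤ l := by
      have hle := PySem.Int.two_pow_bitLength_le (l : Int) (by exact_mod_cast hl0)
      have : 2 ^ (PySem.Int.bitLength (l : Int) - (k+1)) ≤ 2 ^ (PySem.Int.bitLength (l : Int) - 1) :=
        Nat.pow_le_pow_right (by norm_num) (by omega)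
      calc 2 ^ (PySem.Int.bitLength (l : Int) - (k+1)) ≤ 2 ^ (PySem.Int.bitLength (l : Int) - 1) := this
        _ ≤ l := by simpa using hle
    rw [padLoopA, if_neg (by positivity), if_pos h2,
      show 2 * 2 ^ (PySem.Int.bitLength (l : Int) - (k+1)) = 2 ^ (PySem.Int.bitLength (l : Int) - k) by
        rw [← pow_succ']
        congr 1
        omega]
    exact ih (by omega)

lemma padLoopA_eq (l : Nat) : padLoopA l 1 = 1 <<< PySem.Int.bitLength (l : Int) := by
  have := padLoopA_aux l (PySem.Int.bitLength (l : Int)) le_rfl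
  simpa [Nat.one_shiftLeft] using this

lemma foldl_enum_set (f : Int → Int → Int) :
    ∀ (ns : List Int) (k : Nat) (acc : List Int),
      acc.length = k + ns.length → (∀ j, k ≤ j → j < acc.length → acc.getD j 0 = 1) →
      (PySem.List.enumerate ns (k : Int)).foldl
        (fun ans p => ans.set p.1.toNat (f p.2 (ans.getD p.1.toNat 0))) acc
      = acc.take k ++ ns.map (fun n => f n 1) := by
  intro ns
  induction ns with
  | nil =>
    intro k acc hlen _
    have : acc.length ≤ k := by simp at hlen; omega
    simp [PySem.List.enumerate_nil, List.take_of_length_le this]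
  | cons n ns ih =>
    intro k acc hlen hone
    rw [PySem.List.enumerate_cons, List.foldl_cons]
    have hk : ((k : Int)).toNat = k := Int.toNat_natCast k
    have hklen : k < acc.length := by simp only [List.length_cons] at hlen; omega
    have hval : acc.getD k 0 = 1 := hone k le_rfl hklen
    have hcast : (k : Int) + 1 = ((k + 1 : Nat) : Int) := by push_cast; ring
    rw [hk, hval, hcast, ih (k + 1) (acc.set k (f n 1))
      (by rw [List.length_set]; simp only [List.length_cons] at hlen; omega)
      (fun j hj hjl => by
        rw [List.getD_eq_getElem?_getD, List.getElem?_set_ne (by omega)]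
        exact hone j (by omega) (by simpa using hjl))]
    have hset : acc.set k (f n 1) = acc.take k ++ f n 1 :: acc.drop (k + 1) := by
      rw [List.set_eq_take_append_cons_drop]
      simp [hklen]
    rw [hset, List.take_append]
    have hlentk : (acc.take k).length = k := by simp; omega
    rw [List.take_of_length_le (by omega), hlentk,
      show k + 1 - k = 1 from by omega]
    simp

lemma checkB_whole (s : List Char) : (checkB s 0 s.length).2 = Vs s := by
  rw [checkB_eq s s.length 0 s.length rfl le_rfl]
  simp

-- the per-number pipeline of A, as a plain function
lemma solution_eq_map (numbers : List Int) :
    solution numbers = numbers.map (fun n =>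
      recA 1 (List.replicate ((padLoopA (pyBinTail n).length 1 - 1) - (pyBinTail n).length) '0'
        ++ pyBinTail n)) := by
  have hl : (numbers.map (fun _ => (1 : Int))).length = 0 + numbers.length := by simp
  have ho : ∀ j, 0 ≤ j → j < (numbers.map (fun _ => (1 : Int))).length →
      (numbers.map (fun _ => (1 : Int))).getD j 0 = 1 := by
    intro j _ hj
    rw [List.getD_eq_getElem _ _ (by simpa using hj)]
    simp
  exact foldl_enum_set
    (fun n a => recA a (List.replicate ((padLoopA (pyBinTail n).length 1 - 1) - (pyBinTail n).length) '0'
        ++ pyBinTail n)) numbers 0 (numbers.map (fun _ => (1 : Int))) hl ho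

-- ===== VERDICT (by name: the statement is the Claim_ definition above) =====
theorem solution_spec : Claim_equal_solution := by
  unfold Claim_equal_solution
  intro numbers _
  unfold Spec_solution solution_alt
  rw [solution_eq_map]
  apply List.map_congr_left
  intro n _
  simp only []
  rw [padLoopA_eq, recA_eq_Vs, if_neg (by norm_num), checkB_whole]
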